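-- pv_equiv track=rewrite | github.com/KunYi/ioc2cmake | ioc2cmake.py | getCore
-- ===== SOURCE A (Python) =====
-- def getCore(mcuName):
--     coreTable = {
--         "STM32F0": "cortex-m0",
--         "STM32F1": "cortex-m3",
--         "STM32F2": "cortex-m3",
--         "STM32F3": "cortex-m4",
--         "STM32F4": "cortex-m4",
--         "STM32F7": "cortex-m7",
--         "STM32H7": "cortex-m7",
--         "STM32L0": "cortex-m0",
--         "STM32L1": "cortex-m3",
--         "STM32L4": "cortex-m4",
--     }
--     for key, value in coreTable.items():
--         if mcuName.startswith(key):
--             return value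
-- ===== SOURCE B (Python) =====
-- def getCore(mcuName):
--     # Decode the name character-wise instead of scanning a table:
--     # family letter + series digit determine the core directly.
--     if mcuName[:5] != "STM32":
--         return None
--     fam, dig = mcuName[5:6], mcuName[6:7]
--     famOK = fam == "F" or (fam == "H" and dig == "7") \
--         or (fam == "L" and dig in ("0", "1", "4"))
--     if not famOK:
--         return None
--     if dig == "0":
--         return "cortex-m0"
--     if dig in ("1", "2"):
--         return "cortex-m3"
--     if dig in ("3", "4"):
--         return "cortex-m4"
--     if dig == "7":
--         return "cortex-m7"
--     return None
-- ===== Notes on version B (the rewrite author's own statement) =====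
-- stated objective: alternative
-- what changed: Replaces the table scan over 10 startswith-tested entries by character-level decoding: check the fixed five-character stem, validate the family letter/series digit combination, and map the digit directly to the core suffix with no table at all.
import Mathlib
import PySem

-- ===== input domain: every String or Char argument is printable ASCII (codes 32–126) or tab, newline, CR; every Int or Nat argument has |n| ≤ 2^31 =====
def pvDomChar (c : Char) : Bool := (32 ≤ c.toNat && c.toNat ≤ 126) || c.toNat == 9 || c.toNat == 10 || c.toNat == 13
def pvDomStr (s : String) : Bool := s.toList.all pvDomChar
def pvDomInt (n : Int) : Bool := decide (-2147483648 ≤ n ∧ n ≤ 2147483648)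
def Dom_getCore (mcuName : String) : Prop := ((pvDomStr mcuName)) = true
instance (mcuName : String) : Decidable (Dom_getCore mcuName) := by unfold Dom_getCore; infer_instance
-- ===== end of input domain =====

-- B drops the table entirely: it decodes the MCU name character-wise (fixed stem,
-- family letter, series digit) and derives the core from the digit; same return value.

-- ===== PORT A =====
def coreTable : PySem.Dict String String := PySem.Dict.ofList
  [("STM32F0", "cortex-m0"), ("STM32F1", "cortex-m3"), ("STM32F2", "cortex-m3"),
   ("STM32F3", "cortex-m4"), ("STM32F4", "cortex-m4"), ("STM32F7", "cortex-m7"),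
   ("STM32H7", "cortex-m7"), ("STM32L0", "cortex-m0"), ("STM32L1", "cortex-m3"),
   ("STM32L4", "cortex-m4")]

-- the 'for key, value in coreTable.items(): if mcuName.startswith(key): return value' loop
def getCoreLoop (items : List (String × String)) (mcuName : String) : Option String :=
  match items with
  | [] => none
  | (key, value) :: rest =>
      if PySem.Str.startswith mcuName key then some value else getCoreLoop rest mcuName

def getCore (mcuName : String) : Option String :=
  getCoreLoop coreTable.items mcuName

-- ===== PORT B =====
-- transliteration of Source B: slice comparisons and equality tests, no table
def getCore_alt (mcuName : String) : Option String :=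
  if PySem.Str.slice mcuName none (some 5) ≠ "STM32" then none
  else
    let fam := PySem.Str.slice mcuName (some 5) (some 6)
    let dig := PySem.Str.slice mcuName (some 6) (some 7)
    if ¬ (fam = "F" ∨ (fam = "H" ∧ dig = "7") ∨
          (fam = "L" ∧ (dig = "0" ∨ dig = "1" ∨ dig = "4"))) then none
    else if dig = "0" then some "cortex-m0"
    else if dig = "1" ∨ dig = "2" then some "cortex-m3"
    else if dig = "3" ∨ dig = "4" then some "cortex-m4"
    else if dig = "7" then some "cortex-m7"
    else none

-- ===== PRECONDITION & SPEC =====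
def Spec_getCore (mcuName : String) (out : Option String) : Prop := out = getCore_alt mcuName
instance (mcuName : String) (out : Option String) : Decidable (Spec_getCore mcuName out) := by unfold Spec_getCore; infer_instance

-- ===== CLAIM (what is proved, stated in full; the proofs are below) =====
def Claim_equal_getCore : Prop := ∀ (mcuName : String), Dom_getCore mcuName → Spec_getCore mcuName (getCore mcuName)

-- ===== LEMMAS AND PROOFS =====

-- A's loop, unrolled over the ten fixed keys, on the code-point list of the input
def ALoopL (l : List Char) : Option String :=
  if PySem.Chars.startswith l ['S','T','M','3','2','F','0'] then some "cortex-m0"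
  else if PySem.Chars.startswith l ['S','T','M','3','2','F','1'] then some "cortex-m3"
  else if PySem.Chars.startswith l ['S','T','M','3','2','F','2'] then some "cortex-m3"
  else if PySem.Chars.startswith l ['S','T','M','3','2','F','3'] then some "cortex-m4"
  else if PySem.Chars.startswith l ['S','T','M','3','2','F','4'] then some "cortex-m4"
  else if PySem.Chars.startswith l ['S','T','M','3','2','F','7'] then some "cortex-m7"
  else if PySem.Chars.startswith l ['S','T','M','3','2','H','7'] then some "cortex-m7"
  else if PySem.Chars.startswith l ['S','T','M','3','2','L','0'] then some "cortex-m0"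
  else if PySem.Chars.startswith l ['S','T','M','3','2','L','1'] then some "cortex-m3"
  else if PySem.Chars.startswith l ['S','T','M','3','2','L','4'] then some "cortex-m4"
  else none

-- B's slice-and-test decision, on the code-point list of the input
def BAltL (l : List Char) : Option String :=
  if PySem.List.slice l none (some 5) ≠ ['S','T','M','3','2'] then none
  else
    let fam := PySem.List.slice l (some 5) (some 6)
    let dig := PySem.List.slice l (some 6) (some 7)
    if ¬ (fam = ['F'] ∨ (fam = ['H'] ∧ dig = ['7']) ∨
          (fam = ['L'] ∧ (dig = ['0'] ∨ dig = ['1'] ∨ dig = ['4']))) then none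
    else if dig = ['0'] then some "cortex-m0"
    else if dig = ['1'] ∨ dig = ['2'] then some "cortex-m3"
    else if dig = ['3'] ∨ dig = ['4'] then some "cortex-m4"
    else if dig = ['7'] then some "cortex-m7"
    else none

lemma A_eq_list (s : String) : getCore s = ALoopL s.toList := rfl

lemma B_eq_list (s : String) : getCore_alt s = BAltL s.toList := by
  simp only [getCore_alt, BAltL, ne_eq, ← String.toList_inj, PySem.Str.toList_slice,
    PySem.Chars.slice_eq_listSlice,
    show ("STM32":String).toList = ['S','T','M','3','2'] from rfl,
    show ("F":String).toList = ['F'] from rfl, show ("H":String).toList = ['H'] from rfl,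
    show ("L":String).toList = ['L'] from rfl, show ("0":String).toList = ['0'] from rfl,
    show ("1":String).toList = ['1'] from rfl, show ("2":String).toList = ['2'] from rfl,
    show ("3":String).toList = ['3'] from rfl, show ("4":String).toList = ['4'] from rfl,
    show ("7":String).toList = ['7'] from rfl]

set_option maxHeartbeats 2000000 in
lemma main_list (l : List Char) : ALoopL l = BAltL l := by
  rcases l with _|⟨c1,_|⟨c2,_|⟨c3,_|⟨c4,_|⟨c5,_|⟨c6,_|⟨c7,rest⟩⟩⟩⟩⟩⟩⟩ <;>
    (simp only [ALoopL, BAltL]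
     rw [PySem.List.slice_to _ (by norm_num),
         PySem.List.slice_toNat _ (by norm_num) (by norm_num),
         PySem.List.slice_toNat _ (by norm_num) (by norm_num)]
     simp only [Int.reduceToNat, Nat.reduceSub, List.take_succ_cons, List.drop_succ_cons,
       List.take_zero, List.drop_zero, List.take_nil, List.drop_nil, PySem.Chars.startswith,
       List.isPrefixOf, Bool.and_eq_true, beq_iff_eq, List.cons.injEq, and_true, ne_eq,
       Bool.false_eq_true, if_false, not_false_iff, and_false, false_and, reduceCtorEq,
       or_false, false_or, or_self, if_true, true_and, ite_not,
       @eq_comm Char 'S', @eq_comm Char 'T', @eq_comm Char 'M', @eq_comm Char '3',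
       @eq_comm Char '2', @eq_comm Char 'F', @eq_comm Char 'H', @eq_comm Char 'L',
       @eq_comm Char '0', @eq_comm Char '1', @eq_comm Char '4', @eq_comm Char '7'])
  -- the seven too-short cases close outright: every branch of either side is `none`
  all_goals try (split_ifs <;> rfl)
  -- length ≥ 7: decide the stem, then the family letter, then the digit
  by_cases hstem : c1 = 'S' ∧ c2 = 'T' ∧ c3 = 'M' ∧ c4 = '3' ∧ c5 = '2'
  · obtain ⟨e1, e2, e3, e4, e5⟩ := hstem
    subst e1; subst e2; subst e3; subst e4; subst e5
    simp only [Char.reduceEq, eq_self_iff_true, true_and, and_true, false_and, and_false,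
      if_true, if_false, or_false, false_or, not_true, not_false_iff]
    by_cases h6F : c6 = 'F'
    · subst h6F
      simp only [Char.reduceEq, true_and, false_and, and_true, if_false, if_true,
        or_false, false_or, eq_self_iff_true]
      split_ifs <;> simp_all
    · by_cases h6H : c6 = 'H'
      · subst h6H
        simp only [Char.reduceEq, true_and, false_and, and_true, if_false, if_true,
          or_false, false_or, eq_self_iff_true]
        split_ifs <;> simp_all
      · by_cases h6L : c6 = 'L'
        · subst h6L
          simp only [Char.reduceEq, true_and, false_and, and_true, if_false, if_true,
            or_false, false_or, eq_self_iff_true]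
          split_ifs <;> simp_all
        · have hF : ∀ {P : Prop}, ¬(c6 = 'F' ∧ P) := fun h => h6F h.1
          have hH : ∀ {P : Prop}, ¬(c6 = 'H' ∧ P) := fun h => h6H h.1
          have hL : ∀ {P : Prop}, ¬(c6 = 'L' ∧ P) := fun h => h6L h.1
          rw [if_neg hF, if_neg hF, if_neg hF, if_neg hF, if_neg hF, if_neg hF,
              if_neg hH, if_neg hL, if_neg hL, if_neg hL,
              if_neg (show ¬(c6 = 'F' ∨ c6 = 'H' ∧ c7 = '7' ∨
                  c6 = 'L' ∧ (c7 = '0' ∨ c7 = '1' ∨ c7 = '4')) from by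
                rintro (h | ⟨h, -⟩ | ⟨h, -⟩)
                exacts [h6F h, h6H h, h6L h])]
  · have hn : ∀ {P : Prop}, ¬(c1 = 'S' ∧ c2 = 'T' ∧ c3 = 'M' ∧ c4 = '3' ∧ c5 = '2' ∧ P) :=
      fun h => hstem ⟨h.1, h.2.1, h.2.2.1, h.2.2.2.1, h.2.2.2.2.1⟩
    rw [if_neg hn, if_neg hn, if_neg hn, if_neg hn, if_neg hn, if_neg hn, if_neg hn, if_neg hn,
        if_neg hn, if_neg hn, if_neg hstem]

-- ===== VERDICT (by name: the statement is the Claim_ definition above) =====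
theorem getCore_spec : Claim_equal_getCore := by
  intro s _
  exact (A_eq_list s).trans ((main_list s.toList).trans (B_eq_list s).symm)
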